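-- pv_equiv track=rewrite | github.com/andrei4ka/bulls_n_cows | mod/master.py | check_no_duplicates
-- ===== SOURCE A (Python) =====
-- def check_no_duplicates(master_number):
--     """
--     Check that the generated number contains no duplicates
--     :return: The result of the check
--     :rtype: bool
--     """
--     used_digits = set()
--     for digit in master_number:
--         if digit in used_digits:
--             return False
--         else:
--             used_digits.add(digit)
--     return True
-- ===== SOURCE B (Python) =====
-- def check_no_duplicates(master_number):
--     """Cardinality comparison: no duplicates iff the set has as many elements as the sequence."""
--     return len(set(master_number)) == len(master_number)
-- ===== Notes on version B (the rewrite author's own statement) =====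
-- stated objective: idiomatic
-- what changed: Replaced the incremental scan with early return by a single expression that builds the whole set and compares its cardinality to the sequence length.
import Mathlib
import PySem

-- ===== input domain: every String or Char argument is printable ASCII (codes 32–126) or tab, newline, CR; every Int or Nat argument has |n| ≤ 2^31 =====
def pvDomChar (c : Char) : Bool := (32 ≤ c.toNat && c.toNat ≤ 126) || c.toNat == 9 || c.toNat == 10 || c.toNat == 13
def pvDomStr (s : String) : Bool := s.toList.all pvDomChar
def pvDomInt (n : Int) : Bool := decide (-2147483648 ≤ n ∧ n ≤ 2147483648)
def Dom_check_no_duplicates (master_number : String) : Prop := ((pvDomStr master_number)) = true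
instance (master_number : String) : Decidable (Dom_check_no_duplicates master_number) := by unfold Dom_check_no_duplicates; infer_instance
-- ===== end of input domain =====

-- B replaces A's incremental scan (early return on a repeat) by building the whole set once
-- and comparing cardinalities; same behaviour, more idiomatic.

-- ===== PORT A =====
-- the for-loop of A: scan the remaining digits, carrying the 'used_digits' set
def check_no_duplicates_go (l : List Char) (used : PySem.Set Char) : Bool :=
  match l with
  | [] => true
  | d :: rest =>
      if PySem.Set.contains used d then false
      else check_no_duplicates_go rest (PySem.Set.add used d)

def check_no_duplicates (master_number : String) : Bool :=
  check_no_duplicates_go master_number.toList PySem.Set.empty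

-- ===== PORT B =====
def check_no_duplicates_alt (master_number : String) : Bool :=
  decide ((PySem.Set.len (PySem.Set.ofList master_number.toList) : Int) = PySem.Str.len master_number)

-- ===== PRECONDITION & SPEC =====
def Spec_check_no_duplicates (master_number : String) (out : Bool) : Prop := out = check_no_duplicates_alt master_number
instance (master_number : String) (out : Bool) : Decidable (Spec_check_no_duplicates master_number out) := by unfold Spec_check_no_duplicates; infer_instance

-- ===== CLAIM (what is proved, stated in full; the proofs are below) =====
def Claim_equal_check_no_duplicates : Prop := ∀ (master_number : String), Dom_check_no_duplicates master_number → Spec_check_no_duplicates master_number (check_no_duplicates master_number)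

-- ===== LEMMAS AND PROOFS =====

theorem pv_len_add_le {α : Type} [BEq α] (s : PySem.Set α) (x : α) :
    (PySem.Set.add s x).length ≤ s.length + 1 := by
  unfold PySem.Set.add
  split <;> simp

theorem pv_len_update_le {α : Type} [BEq α] :
    ∀ (l : List α) (s : PySem.Set α), (PySem.Set.update s l).length ≤ s.length + l.length := by
  intro l
  induction l with
  | nil => intro s; simp [PySem.Set.update]
  | cons d rest ih =>
      intro s
      have h1 : PySem.Set.update s (d :: rest) = PySem.Set.update (PySem.Set.add s d) rest := by
        simp [PySem.Set.update]
      rw [h1]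
      have h2 := ih (PySem.Set.add s d)
      have h3 := pv_len_add_le s d
      simp only [List.length_cons]
      omega

theorem pv_go_eq_len :
    ∀ (l : List Char) (used : PySem.Set Char),
      check_no_duplicates_go l used
        = decide ((PySem.Set.update used l).length = used.length + l.length) := by
  intro l
  induction l with
  | nil => intro used; simp [check_no_duplicates_go, PySem.Set.update]
  | cons d rest ih =>
      intro used
      have hupd : PySem.Set.update used (d :: rest) = PySem.Set.update (PySem.Set.add used d) rest := by
        simp [PySem.Set.update]
      rw [check_no_duplicates_go, hupd]
      by_cases h : PySem.Set.contains used d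
      · have hd : d ∈ used := by simpa using h
        have hadd : PySem.Set.add used d = used := by simp [PySem.Set.add, hd]
        rw [if_pos h, hadd]
        have hle := pv_len_update_le rest used
        symm
        rw [decide_eq_false_iff_not]
        simp only [List.length_cons]
        omega
      · have hd : ¬ d ∈ used := by simpa using h
        have hadd : (PySem.Set.add used d).length = used.length + 1 := by
          simp [PySem.Set.add, hd]
        rw [if_neg h, ih]
        simp only [List.length_cons, hadd]
        congr 1
        simp only [eq_iff_iff]
        omega

theorem check_no_duplicates_spec : Claim_equal_check_no_duplicates := by
  intro s _
  unfold Spec_check_no_duplicates check_no_duplicates check_no_duplicates_alt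
  rw [pv_go_eq_len]
  have hof : PySem.Set.ofList s.toList = PySem.Set.update PySem.Set.empty s.toList := by
    simp [PySem.Set.ofList_eq_foldl, PySem.Set.update, PySem.Set.empty]
  rw [hof]
  simp [PySem.Set.len, PySem.Str.len_eq, PySem.Set.empty]
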